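-- pv_equiv track=rewrite | github.com/stonedge77/OhAI- | ohai.py | nand_verbs
-- ===== SOURCE A (Python) =====
-- VERB_OPPOSITES = {
--     'rise':'fall','fall':'rise','expand':'contract','contract':'expand',
--     'open':'close','close':'open','merge':'split','split':'merge',
--     'amplify':'attenuate','attenuate':'amplify','ascend':'descend',
--     'descend':'ascend','emit':'absorb','absorb':'emit',
--     'accelerate':'decelerate','decelerate':'accelerate',
--     'crystallize':'dissolve','dissolve':'crystallize',
--     'activate':'inhibit','inhibit':'activate',
--     'appear':'disappear','disappear':'appear',
--     'build':'destroy','destroy':'build',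
--     'accumulate':'deplete','deplete':'accumulate',
--     'unite':'separate','separate':'unite',
--     'bind':'free','free':'bind',
--     'thrust':'dance','dance':'thrust',
--     'impose':'release','release':'impose',
-- }
--
-- def nand_verbs(sets: list[set]) -> set:
--     """NAND across multiple verb sets — what survives elimination."""
--     if not sets:
--         return set()
--     all_verbs = set()
--     for s in sets:
--         all_verbs |= s
--     # Count occurrences — verbs appearing in ALL sets cancel (maximal opposition)
--     counts = {}
--     for s in sets:
--         for v in s:
--             counts[v] = counts.get(v, 0) + 1
--     # Cancel those appearing in every source (fully absorbed = no gradient)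
--     n = len(sets)
--     survivors = {v for v, c in counts.items() if c < n}
--     # Apply VERB_OPPOSITES within survivors
--     cancelled = set()
--     for v in list(survivors):
--         if v in cancelled:
--             continue
--         opp = VERB_OPPOSITES.get(v)
--         if opp and opp in survivors:
--             cancelled.add(v)
--             cancelled.add(opp)
--     return survivors - cancelled
-- ===== SOURCE B (Python) =====
-- # Canonical opposite pairs (each verb of VERB_OPPOSITES appears in exactly one pair).
-- OPP_PAIRS = [
--     ('rise', 'fall'), ('expand', 'contract'), ('open', 'close'),
--     ('merge', 'split'), ('amplify', 'attenuate'), ('ascend', 'descend'),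
--     ('emit', 'absorb'), ('accelerate', 'decelerate'),
--     ('crystallize', 'dissolve'), ('activate', 'inhibit'),
--     ('appear', 'disappear'), ('build', 'destroy'),
--     ('accumulate', 'deplete'), ('unite', 'separate'),
--     ('bind', 'free'), ('thrust', 'dance'), ('impose', 'release'),
-- ]
--
-- def nand_verbs(sets: list[set]) -> set:
--     """NAND across multiple verb sets — what survives elimination."""
--     if not sets:
--         return set()
--     # A verb survives iff some source set lacks it (no counting dict needed).
--     survivors = {v for s in sets for v in s if any(v not in t for t in sets)}
--     # Knock out both members of every opposite pair wholly inside the survivors.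
--     for a, b in OPP_PAIRS:
--         if a in survivors and b in survivors:
--             survivors -= {a, b}
--     return survivors
-- ===== Notes on version B (the rewrite author's own statement) =====
-- stated objective: simpler
-- what changed: Drops A's occurrence-count dict (and its c < n filter) for a direct per-verb test 'some source set lacks v', and replaces A's survivor-driven cancellation loop with its VERB_OPPOSITES dict lookups and mutable 'cancelled' set by one pass over a static list of 17 canonical opposite pairs that deletes both members when both survive.
import Mathlib
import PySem

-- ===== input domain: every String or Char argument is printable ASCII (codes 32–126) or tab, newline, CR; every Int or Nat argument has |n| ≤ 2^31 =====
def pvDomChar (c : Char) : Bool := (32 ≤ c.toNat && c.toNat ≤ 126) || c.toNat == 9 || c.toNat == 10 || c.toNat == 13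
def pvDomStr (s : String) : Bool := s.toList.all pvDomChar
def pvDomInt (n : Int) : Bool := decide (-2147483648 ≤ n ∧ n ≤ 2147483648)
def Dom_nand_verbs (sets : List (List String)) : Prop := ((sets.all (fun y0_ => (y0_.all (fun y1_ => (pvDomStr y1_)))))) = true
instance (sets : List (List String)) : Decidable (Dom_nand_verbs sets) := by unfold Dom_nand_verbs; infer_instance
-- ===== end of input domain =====

-- B drops A's occurrence-count dict for a per-verb "some source set lacks v" test and replaces
-- A's survivor-driven cancellation loop (dict lookups + mutable cancelled set) by one pass over a
-- static list of 17 canonical opposite pairs (objective: simpler).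

-- ===== PORT A =====
def vOpp : PySem.Dict String String := PySem.Dict.ofList [
  ("rise","fall"),("fall","rise"),("expand","contract"),("contract","expand"),
  ("open","close"),("close","open"),("merge","split"),("split","merge"),
  ("amplify","attenuate"),("attenuate","amplify"),("ascend","descend"),
  ("descend","ascend"),("emit","absorb"),("absorb","emit"),
  ("accelerate","decelerate"),("decelerate","accelerate"),
  ("crystallize","dissolve"),("dissolve","crystallize"),
  ("activate","inhibit"),("inhibit","activate"),
  ("appear","disappear"),("disappear","appear"),
  ("build","destroy"),("destroy","build"),
  ("accumulate","deplete"),("deplete","accumulate"),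
  ("unite","separate"),("separate","unite"),
  ("bind","free"),("free","bind"),
  ("thrust","dance"),("dance","thrust"),
  ("impose","release"),("release","impose")]

-- the body of A's `for v in list(survivors)` loop (S = survivors, c = cancelled)
def cancelStep (S : PySem.Set String) (c : PySem.Set String) (v : String) : PySem.Set String :=
  if PySem.Set.contains c v then c
  else
    match vOpp.get? v with
    | some opp =>
        if opp ≠ "" ∧ PySem.Set.contains S opp = true then
          PySem.Set.add (PySem.Set.add c v) opp
        else c
    | none => c

def nand_verbs (sets : List (List String)) : List String :=
  if sets.isEmpty then []
  else
    let _all_verbs := sets.foldl (fun acc s => PySem.Set.union acc s) PySem.Set.empty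
    let counts := sets.foldl
      (fun d s => s.foldl (fun d v => d.insert v (d.getD v 0 + 1)) d)
      (PySem.Dict.empty : PySem.Dict String Int)
    let n : Int := sets.length
    let survivors : PySem.Set String :=
      PySem.Set.ofList ((counts.items.filter (fun p => p.2 < n)).map (fun p => p.1))
    let cancelled := survivors.foldl (cancelStep survivors) PySem.Set.empty
    PySem.Set.diff survivors cancelled

-- ===== PORT B =====
def oppPairs : List (String × String) := [
  ("rise", "fall"), ("expand", "contract"), ("open", "close"),
  ("merge", "split"), ("amplify", "attenuate"), ("ascend", "descend"),
  ("emit", "absorb"), ("accelerate", "decelerate"),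
  ("crystallize", "dissolve"), ("activate", "inhibit"),
  ("appear", "disappear"), ("build", "destroy"),
  ("accumulate", "deplete"), ("unite", "separate"),
  ("bind", "free"), ("thrust", "dance"), ("impose", "release")]

-- the body of B's `for a, b in OPP_PAIRS` loop
def pairStep (surv : PySem.Set String) (p : String × String) : PySem.Set String :=
  if PySem.Set.contains surv p.1 && PySem.Set.contains surv p.2 then
    PySem.Set.diff surv [p.1, p.2]
  else surv

def nand_verbs_alt (sets : List (List String)) : List String :=
  if sets.isEmpty then []
  else
    let survivors : PySem.Set String := PySem.Set.ofList
      (sets.flatMap (fun s => s.filter (fun v => sets.any (fun t => !(PySem.Set.contains t v)))))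
    oppPairs.foldl pairStep survivors

-- ===== PRECONDITION & SPEC =====
-- Pre_ restricts the inputs to valid encodings of Python sets: inner lists without duplicate
-- elements (real Python only ever passes sets, which can never carry a duplicate; on a
-- duplicate-bearing list A's occurrence count and B's membership test legitimately differ).
def Pre_nand_verbs (sets : List (List String)) : Prop := ∀ s ∈ sets, s.Nodup
instance (sets : List (List String)) : Decidable (Pre_nand_verbs sets) := by
  unfold Pre_nand_verbs; infer_instance

def pvWitness_nand_verbs : List (List String) :=
  [["rise", "open", "walk"], ["rise", "close"]]

def Spec_nand_verbs (sets : List (List String)) (out : List String) : Prop := out = nand_verbs_alt sets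
instance (sets : List (List String)) (out : List String) : Decidable (Spec_nand_verbs sets out) := by unfold Spec_nand_verbs; infer_instance

-- ===== CLAIM (what is proved, stated in full; the proofs are below) =====
def Claim_equal_nand_verbs : Prop := ∀ (sets : List (List String)), Dom_nand_verbs sets → Pre_nand_verbs sets → Spec_nand_verbs sets (nand_verbs sets)

-- ===== LEMMAS AND PROOFS =====

-- the verb-opposites table is symmetric
set_option maxRecDepth 100000 in
lemma vOpp_symm {k o : String} (h : vOpp.get? k = some o) : vOpp.get? o = some k := by
  have hm := PySem.Dict.mem_items_of_get?_eq_some vOpp h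
  have hall : ∀ p ∈ vOpp.items, vOpp.get? p.2 = some p.1 := by decide
  exact hall _ hm

-- no value of the table is the empty string (Python's `if opp` truthiness)
set_option maxRecDepth 100000 in
lemma vOpp_ne_empty {k o : String} (h : vOpp.get? k = some o) : o ≠ "" := by
  have hm := PySem.Dict.mem_items_of_get?_eq_some vOpp h
  have hall : ∀ p ∈ vOpp.items, p.2 ≠ "" := by decide
  exact hall _ hm

-- one step of the loop keeps every previous member
lemma mem_cancelStep_of_mem {S c : PySem.Set String} {v x : String}
    (h : x ∈ c) : x ∈ cancelStep S c v := by
  simp only [cancelStep]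
  split
  · exact h
  · split
    · split
      · simp only [PySem.Set.mem_add]
        exact Or.inl (Or.inl h)
      · exact h
    · exact h

-- the cancellation fold only grows the accumulator
lemma mem_cancel_fold_of_mem {S c : PySem.Set String} {l : List String} {x : String}
    (h : x ∈ c) : x ∈ l.foldl (cancelStep S) c := by
  induction l generalizing c with
  | nil => exact h
  | cons v t ih =>
    simp only [List.foldl_cons]
    exact ih (mem_cancelStep_of_mem h)

-- one step of the cancellation loop, membership-wise
lemma mem_cancelStep {S c : PySem.Set String} {v x : String}
    (h : x ∈ cancelStep S c v) :
    x ∈ c ∨ ∃ o, vOpp.get? v = some o ∧ o ∈ S ∧ (x = v ∨ x = o) := by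
  simp only [cancelStep] at h
  split at h
  · exact Or.inl h
  · split at h
    · rename_i o hgo
      split at h
      · rename_i hcond
        simp only [PySem.Set.mem_add] at h
        rcases h with (h | rfl) | rfl
        · exact Or.inl h
        · exact Or.inr ⟨o, hgo, (PySem.Set.contains_iff S o).mp hcond.2, Or.inl rfl⟩
        · exact Or.inr ⟨x, hgo, (PySem.Set.contains_iff S x).mp hcond.2, Or.inr rfl⟩
      · exact Or.inl h
    · exact Or.inl h

-- everything in the final accumulator is in c or part of an opposite pair inside S met in l
lemma mem_cancel_fold_sound {S c : PySem.Set String} {l : List String} {x : String}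
    (h : x ∈ l.foldl (cancelStep S) c) :
    x ∈ c ∨ ∃ v o, v ∈ l ∧ vOpp.get? v = some o ∧ o ∈ S ∧ (x = v ∨ x = o) := by
  induction l generalizing c with
  | nil => exact Or.inl h
  | cons v t ih =>
    simp only [List.foldl_cons] at h
    rcases ih h with hc | ⟨v', o, hv', hg, ho, hx⟩
    · rcases mem_cancelStep hc with hc' | ⟨o, hgo, ho, hx⟩
      · exact Or.inl hc'
      · exact Or.inr ⟨v, o, by simp, hgo, ho, hx⟩
    · exact Or.inr ⟨v', o, List.mem_cons_of_mem _ hv', hg, ho, hx⟩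

-- every member of l whose opposite lies in S ends up cancelled
lemma mem_cancel_fold_complete {S c : PySem.Set String} {l : List String} {x o : String}
    (hx : x ∈ l) (hg : vOpp.get? x = some o) (ho : o ∈ S) :
    x ∈ l.foldl (cancelStep S) c := by
  induction l generalizing c with
  | nil => cases hx
  | cons v t ih =>
    rcases List.mem_cons.mp hx with rfl | hxt
    · simp only [List.foldl_cons]
      apply mem_cancel_fold_of_mem
      simp only [cancelStep]
      split
      · rename_i hcv; rwa [PySem.Set.contains_iff] at hcv
      · rw [hg]
        show x ∈ if o ≠ "" ∧ PySem.Set.contains S o = true then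
            PySem.Set.add (PySem.Set.add c x) o else c
        rw [if_pos ⟨vOpp_ne_empty hg, (PySem.Set.contains_iff S o).mpr ho⟩]
        simp [PySem.Set.mem_add]
    · simp only [List.foldl_cons]
      exact ih hxt

-- membership characterisation of A's `cancelled` set
lemma mem_cancelled_iff {S : PySem.Set String} {x : String} (hx : x ∈ S) :
    (x ∈ S.foldl (cancelStep S) PySem.Set.empty) ↔
      ∃ o, vOpp.get? x = some o ∧ o ∈ S := by
  constructor
  · intro h
    rcases mem_cancel_fold_sound h with hc | ⟨v, o, hv, hg, ho, hxe⟩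
    · cases hc
    · rcases hxe with rfl | rfl
      · exact ⟨o, hg, ho⟩
      · exact ⟨v, vOpp_symm hg, hv⟩
  · rintro ⟨o, hg, ho⟩
    exact mem_cancel_fold_complete hx hg ho

-- counting in the flattened list counts the sets that contain x (inner lists Nodup)
lemma count_flatten (ls : List (List String)) (h : ∀ s ∈ ls, s.Nodup) (x : String) :
    ls.flatten.count x = ls.countP (fun s => decide (x ∈ s)) := by
  induction ls with
  | nil => simp
  | cons s t ih =>
    simp only [List.flatten_cons, List.count_append, List.countP_cons]
    rw [ih (fun u hu => h u (List.mem_cons_of_mem _ hu))]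
    by_cases hx : x ∈ s
    · rw [List.count_eq_one_of_mem (h s (by simp)) hx]; simp [hx]; omega
    · rw [List.count_eq_zero_of_not_mem hx]; simp [hx]

-- the survivor predicate: count < n  ↔  not in every set
lemma count_lt_iff (ls : List (List String)) (h : ∀ s ∈ ls, s.Nodup) (x : String) :
    ((ls.flatten.count x : Int) < (ls.length : Int)) ↔ ¬ (∀ s ∈ ls, x ∈ s) := by
  rw [count_flatten ls h x]
  have hle : ls.countP (fun s => decide (x ∈ s)) ≤ ls.length := List.countP_le_length
  have heq := @List.countP_eq_length _ ls (fun s => decide (x ∈ s))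
  constructor
  · intro hlt hall
    have : ls.countP (fun s => decide (x ∈ s)) = ls.length := heq.mpr (by simpa using hall)
    omega
  · intro hnall
    have : ls.countP (fun s => decide (x ∈ s)) ≠ ls.length := fun he => hnall (by
      intro s hs; simpa using heq.mp he s hs)
    omega

-- A's survivors are set(flatten) filtered by the count predicate
lemma survA_eq (sets : List (List String)) :
    PySem.Set.ofList
        (((sets.foldl
              (fun d s => s.foldl (fun d v => d.insert v (d.getD v 0 + 1)) d)
              (PySem.Dict.empty : PySem.Dict String Int)).items.filter
            (fun p => p.2 < (sets.length : Int))).map (fun p => p.1))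
      = (PySem.Set.ofList sets.flatten).filter
          (fun x => decide ((sets.flatten.count x : Int) < (sets.length : Int))) := by
  have h1 : (sets.foldl
      (fun d s => s.foldl (fun d v => d.insert v (d.getD v 0 + 1)) d)
      (PySem.Dict.empty : PySem.Dict String Int))
      = PySem.Dict.counter sets.flatten := by
    rw [← List.foldl_flatten]
    rfl
  rw [h1, PySem.Dict.items_counter, List.filter_map, List.map_map]
  simp only [Function.comp_def, List.map_id_fun', id]
  exact PySem.Set.ofList_eq_self_of_nodup _
    (List.Nodup.filter _ (PySem.Set.nodup_ofList sets.flatten))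

-- discarding an element commutes with a filter
lemma discard_filter (S : PySem.Set String) (p : String → Bool) (y : String) :
    PySem.Set.discard (S.filter p) y = (PySem.Set.discard S y).filter p := by
  show (S.filter p).filter (fun a => !(a == y)) = (S.filter (fun a => !(a == y))).filter p
  rw [List.filter_filter, List.filter_filter]
  exact List.filter_congr (fun a _ => by rw [Bool.and_comm])

-- set(filter(p, l)) = filter(p, set(l))
lemma ofList_filter (l : List String) (p : String → Bool) :
    PySem.Set.ofList (l.filter p) = (PySem.Set.ofList l).filter p := by
  induction l with
  | nil => rfl
  | cons x xs ih =>
    rw [List.filter_cons, PySem.Set.ofList_cons]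
    by_cases hp : p x
    · rw [if_pos hp, PySem.Set.ofList_cons, ih, discard_filter]
      simp [hp]
    · rw [if_neg hp, ih, List.filter_cons]
      simp only [hp, Bool.false_eq_true, if_false]
      show _ = (PySem.Set.discard (PySem.Set.ofList xs) x).filter p
      show _ = ((PySem.Set.ofList xs).filter (fun a => !(a == x))).filter p
      rw [List.filter_filter]
      refine (List.filter_congr (fun a _ => ?_)).symm
      by_cases hax : a = x
      · subst hax; simp [hp]
      · simp [hax]

-- B's survivors are set(flatten) filtered by the "some set lacks v" predicate
lemma survB_eq (sets : List (List String)) :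
    PySem.Set.ofList
        (sets.flatMap (fun s => s.filter (fun v => sets.any (fun t => !(PySem.Set.contains t v)))))
      = (PySem.Set.ofList sets.flatten).filter
          (fun v => sets.any (fun t => !(PySem.Set.contains t v))) := by
  rw [List.flatMap_def, ← List.filter_flatten, ofList_filter]

-- on members of flatten, the two survivor predicates agree (inner lists Nodup)
lemma surv_pred_eq (sets : List (List String)) (h : ∀ s ∈ sets, s.Nodup) (x : String) :
    decide ((sets.flatten.count x : Int) < (sets.length : Int))
      = sets.any (fun t => !(PySem.Set.contains t x)) := by
  have hiff : ((sets.flatten.count x : Int) < (sets.length : Int)) ↔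
      (sets.any (fun t => !(PySem.Set.contains t x)) = true) := by
    rw [count_lt_iff sets h x, List.any_eq_true]
    constructor
    · intro hn
      push Not at hn
      obtain ⟨t, htm, hxm⟩ := hn
      exact ⟨t, htm, by simpa using hxm⟩
    · rintro ⟨t, htm, hxt⟩ hall
      simp only [Bool.not_eq_eq_eq_not, Bool.not_true] at hxt
      exact absurd ((PySem.Set.contains_iff t x).mpr (hall t htm))
        (by rw [hxt]; exact Bool.false_ne_true)
  by_cases hc : (sets.flatten.count x : Int) < (sets.length : Int)
  · rw [decide_eq_true hc, (hiff.mp hc).symm]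
  · rw [decide_eq_false hc]
    exact ((Bool.not_eq_true _).mp (fun he => hc (hiff.mpr he))).symm

-- which verbs B's pair loop knocks out of S
def hitBy (S : PySem.Set String) (ps : List (String × String)) (x : String) : Bool :=
  ps.any (fun p => (x == p.1 || x == p.2) && PySem.Set.contains S p.1 && PySem.Set.contains S p.2)

-- Set.contains on a two-element literal list
lemma contains_pair (a b x : String) :
    PySem.Set.contains [a, b] x = (x == a || x == b) := by
  by_cases h1 : x = a <;> by_cases h2 : x = b <;>
    simp [PySem.Set.contains_eq_listContains, h1, h2]

-- B's pair fold, characterised as one filter of S (pairs have pairwise-distinct components)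
lemma foldl_pairStep (ps : List (String × String)) (S : PySem.Set String) (r : String → Bool)
    (hdisj : (ps.flatMap (fun p => [p.1, p.2])).Nodup)
    (hr : ∀ p ∈ ps, r p.1 = true ∧ r p.2 = true) :
    ps.foldl pairStep (S.filter r) = S.filter (fun x => r x && !(hitBy S ps x)) := by
  induction ps generalizing r with
  | nil => simp [hitBy]
  | cons p rest ih =>
    have hdj : p.1 ≠ p.2 ∧ (∀ q ∈ rest, p.1 ≠ q.1 ∧ p.1 ≠ q.2 ∧ p.2 ≠ q.1 ∧ p.2 ≠ q.2) ∧
        (rest.flatMap (fun q => [q.1, q.2])).Nodup := by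
      simp only [List.flatMap_cons, List.cons_append, List.nil_append, List.nodup_cons,
        List.mem_cons] at hdisj
      obtain ⟨h1, h2, h3⟩ := hdisj
      push Not at h1
      refine ⟨h1.1, fun q hq => ?_, h3⟩
      have hm1 : p.1 ∉ rest.flatMap (fun q => [q.1, q.2]) := h1.2
      have hm2 : p.2 ∉ rest.flatMap (fun q => [q.1, q.2]) := h2
      have hq1 : q.1 ∈ rest.flatMap (fun q => [q.1, q.2]) :=
        List.mem_flatMap.mpr ⟨q, hq, by simp⟩
      have hq2 : q.2 ∈ rest.flatMap (fun q => [q.1, q.2]) :=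
        List.mem_flatMap.mpr ⟨q, hq, by simp⟩
      exact ⟨fun he => hm1 (he ▸ hq1), fun he => hm1 (he ▸ hq2),
             fun he => hm2 (he ▸ hq1), fun he => hm2 (he ▸ hq2)⟩
    obtain ⟨hr1, hr2⟩ := hr p (by simp)
    simp only [List.foldl_cons]
    by_cases hc : PySem.Set.contains S p.1 = true ∧ PySem.Set.contains S p.2 = true
    · have hcf1 : PySem.Set.contains (S.filter r) p.1 = true := by
        rw [PySem.Set.contains_iff, List.mem_filter]
        exact ⟨(PySem.Set.contains_iff S p.1).mp hc.1, hr1⟩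
      have hcf2 : PySem.Set.contains (S.filter r) p.2 = true := by
        rw [PySem.Set.contains_iff, List.mem_filter]
        exact ⟨(PySem.Set.contains_iff S p.2).mp hc.2, hr2⟩
      have hstep : pairStep (S.filter r) p
          = S.filter (fun x => r x && !(x == p.1 || x == p.2)) := by
        rw [pairStep, if_pos (by rw [hcf1, hcf2]; rfl)]
        show (S.filter r).filter (fun x => !(PySem.Set.contains [p.1, p.2] x)) = _
        rw [List.filter_filter]
        exact List.filter_congr (fun x _ => by rw [contains_pair, Bool.and_comm])
      rw [hstep, ih _ hdj.2.2 (fun q hq => by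
        obtain ⟨h1, h2, h3, h4⟩ := hdj.2.1 q hq
        obtain ⟨hq1, hq2⟩ := hr q (List.mem_cons_of_mem _ hq)
        constructor
        · simp [hq1, beq_eq_false_iff_ne.mpr (Ne.symm h1),
                beq_eq_false_iff_ne.mpr (Ne.symm h3)]
        · simp [hq2, beq_eq_false_iff_ne.mpr (Ne.symm h2),
                beq_eq_false_iff_ne.mpr (Ne.symm h4)])]
      refine List.filter_congr (fun x _ => ?_)
      simp only [hitBy, List.any_cons, hc.1, hc.2, Bool.and_true]
      cases hxp : (x == p.1 || x == p.2) <;> cases rest.any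
          (fun q => (x == q.1 || x == q.2) && PySem.Set.contains S q.1 &&
            PySem.Set.contains S q.2) <;> simp
    · have hcond : (PySem.Set.contains (S.filter r) p.1 &&
          PySem.Set.contains (S.filter r) p.2) = false := by
        rcases (Decidable.not_and_iff_or_not ..).mp hc with hf | hf
        · have : PySem.Set.contains (S.filter r) p.1 = false := by
            rw [← Bool.not_eq_true, PySem.Set.contains_iff, List.mem_filter]
            exact fun hm => hf ((PySem.Set.contains_iff S p.1).mpr hm.1)
          rw [this, Bool.false_and]
        · have : PySem.Set.contains (S.filter r) p.2 = false := by
            rw [← Bool.not_eq_true, PySem.Set.contains_iff, List.mem_filter]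
            exact fun hm => hf ((PySem.Set.contains_iff S p.2).mpr hm.1)
          rw [this, Bool.and_false]
      have hstep : pairStep (S.filter r) p = S.filter r := by
        rw [pairStep, if_neg (by rw [hcond]; exact Bool.false_ne_true)]
      rw [hstep, ih r hdj.2.2 (fun q hq => hr q (List.mem_cons_of_mem _ hq))]
      refine List.filter_congr (fun x _ => ?_)
      simp only [hitBy, List.any_cons]
      have hps : ((x == p.1 || x == p.2) && PySem.Set.contains S p.1 &&
          PySem.Set.contains S p.2) = false := by
        rcases (Decidable.not_and_iff_or_not ..).mp hc with hf | hf
        · rw [Bool.eq_false_iff.mpr hf, Bool.and_false, Bool.false_and]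
        · rw [Bool.eq_false_iff.mpr hf, Bool.and_false]
      rw [hps, Bool.false_or]

-- the component strings of oppPairs are pairwise distinct
set_option maxRecDepth 100000 in
lemma oppPairs_nodup : (oppPairs.flatMap (fun p => [p.1, p.2])).Nodup := by decide

-- every table entry appears (one way round) among the pairs, and vice versa
set_option maxRecDepth 100000 in
lemma vOpp_to_pairs : ∀ pr ∈ vOpp.items, pr ∈ oppPairs ∨ (pr.2, pr.1) ∈ oppPairs := by decide

set_option maxRecDepth 100000 in
lemma pairs_to_vOpp : ∀ p ∈ oppPairs, vOpp.get? p.1 = some p.2 ∧ vOpp.get? p.2 = some p.1 := by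
  decide

-- B's pair fold computes exactly A's survivors-minus-cancelled
lemma cancel_eq (S : PySem.Set String) :
    oppPairs.foldl pairStep S
      = PySem.Set.diff S (S.foldl (cancelStep S) PySem.Set.empty) := by
  have h0 : S.filter (fun _ => true) = S := List.filter_true S
  rw [← h0, foldl_pairStep oppPairs S (fun _ => true) oppPairs_nodup (fun p _ => ⟨rfl, rfl⟩), h0]
  show _ = S.filter (fun x => !(PySem.Set.contains (S.foldl (cancelStep S) PySem.Set.empty) x))
  refine List.filter_congr (fun x hx => ?_)
  rw [Bool.true_and]
  have hiff : hitBy S oppPairs x = true ↔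
      PySem.Set.contains (S.foldl (cancelStep S) PySem.Set.empty) x = true := by
    rw [PySem.Set.contains_iff, mem_cancelled_iff hx, hitBy, List.any_eq_true]
    constructor
    · rintro ⟨p, hp, hb⟩
      simp only [Bool.and_eq_true, Bool.or_eq_true, beq_iff_eq] at hb
      obtain ⟨⟨hxe, hc1⟩, hc2⟩ := hb
      obtain ⟨hg1, hg2⟩ := pairs_to_vOpp p hp
      rcases hxe with rfl | rfl
      · exact ⟨p.2, hg1, (PySem.Set.contains_iff S p.2).mp hc2⟩
      · exact ⟨p.1, hg2, (PySem.Set.contains_iff S p.1).mp hc1⟩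
    · rintro ⟨o, hg, ho⟩
      have hm := PySem.Dict.mem_items_of_get?_eq_some vOpp hg
      rcases vOpp_to_pairs _ hm with hp | hp
      · exact ⟨(x, o), hp, by
          simp [hx, ho]⟩
      · exact ⟨(o, x), hp, by
          simp [hx, ho]⟩
  cases hh : hitBy S oppPairs x
  · have hcf : PySem.Set.contains (S.foldl (cancelStep S) PySem.Set.empty) x = false :=
      Bool.eq_false_iff.mpr (fun he => Bool.false_ne_true (hh ▸ hiff.mpr he))
    rw [hcf]
  · rw [hiff.mp hh]

theorem nand_verbs_eq (sets : List (List String)) (hpre : Pre_nand_verbs sets) :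
    nand_verbs sets = nand_verbs_alt sets := by
  cases hsets : sets with
  | nil => rfl
  | cons s0 rest =>
    subst hsets
    simp only [nand_verbs, nand_verbs_alt, List.isEmpty_cons, Bool.false_eq_true, if_false]
    rw [survA_eq, survB_eq]
    have hpred : ((PySem.Set.ofList (s0 :: rest).flatten).filter
        (fun x => decide (((s0 :: rest).flatten.count x : Int) < ((s0 :: rest).length : Int))))
        = ((PySem.Set.ofList (s0 :: rest).flatten).filter
        (fun v => (s0 :: rest).any (fun t => !(PySem.Set.contains t v)))) :=
      List.filter_congr (fun x _ => surv_pred_eq (s0 :: rest) hpre x)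
    rw [← hpred, cancel_eq]

-- ===== VERDICT (by name: the statement is the Claim_ definition above) =====
theorem nand_verbs_spec : Claim_equal_nand_verbs := by
  intro sets _ hpre
  exact nand_verbs_eq sets hpre
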